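-- pv_equiv track=rewrite | github.com/bayekislove/University | Python/WdPP/Pracownia 11/permutacyjna_postac_normalna.py | pnf
-- ===== SOURCE A (Python) =====
-- def pnf(s):
--     pnf_zwrot = []
--     literka_liczba = {}
--     spotkane_literki = 1
--     for literka in s:
--         if literka not in literka_liczba.keys():
--             literka_liczba[literka] = spotkane_literki
--             pnf_zwrot.append(str(spotkane_literki))
--             spotkane_literki += 1
--         else:
--             pnf_zwrot.append(str(literka_liczba[literka]))
--     slowko = '-'.join(pnf_zwrot)
--     return slowko
-- ===== SOURCE B (Python) =====
-- def pnf(s):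
--     # rank of c = 1 + number of distinct characters strictly before c's first occurrence
--     return '-'.join(str(len(set(s[:s.index(c)])) + 1) for c in s)
-- ===== Notes on version B (the rewrite author's own statement) =====
-- stated objective: alternative
-- what changed: A keeps a char->ordinal dict and a running counter in one interleaved loop; B drops the table entirely and computes each character's rank by a direct closed form, rank(c) = 1 + len(set(s[:s.index(c)])), trading A's linear incremental state for a stateless quadratic per-character computation.
import Mathlib
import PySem

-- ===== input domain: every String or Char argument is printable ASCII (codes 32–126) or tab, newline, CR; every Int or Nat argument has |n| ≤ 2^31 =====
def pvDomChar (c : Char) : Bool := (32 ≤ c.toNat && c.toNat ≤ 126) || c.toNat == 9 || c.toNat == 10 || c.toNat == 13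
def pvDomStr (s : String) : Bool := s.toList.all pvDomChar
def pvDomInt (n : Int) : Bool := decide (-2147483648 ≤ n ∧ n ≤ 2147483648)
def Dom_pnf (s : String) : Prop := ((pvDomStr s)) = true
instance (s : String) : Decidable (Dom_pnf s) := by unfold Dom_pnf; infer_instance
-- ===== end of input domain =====

-- B drops A's char->ordinal dict and counter entirely: each character's rank is computed
-- directly as 1 + len(set(s[:s.index(c)])) (objective: alternative — stateless closed form
-- per character instead of incremental state; quadratic instead of linear).

-- ===== PORT A =====
-- loop body of A: state = (pnf_zwrot, literka_liczba, spotkane_literki)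
def pnfStep (st : List String × PySem.Dict Char Int × Int) (literka : Char) :
    List String × PySem.Dict Char Int × Int :=
  let (out, d, n) := st
  if d.contains literka = false then
    (out ++ [PySem.Int.toStr n], d.insert literka n, n + 1)
  else
    -- d[literka]: the key is present in this branch, so getD's default is never used
    (out ++ [PySem.Int.toStr (d.getD literka 0)], d, n)

def pnf (s : String) : String :=
  let st := s.toList.foldl pnfStep ([], PySem.Dict.empty, 1)
  PySem.Str.join "-" st.1

-- ===== PORT B =====
def pnf_alt (s : String) : String :=
  PySem.Str.join "-" (s.toList.map (fun c =>
    -- s.index(c): c is drawn from s itself, so index? is always some; getD's default is never used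
    let j := (PySem.List.index? s.toList c).getD 0
    -- s[:j] with 0 ≤ j ≤ len(s): the slice is exactly List.take j
    PySem.Int.toStr (PySem.Set.len (PySem.Set.ofList (s.toList.take j)) + 1)))

-- ===== PRECONDITION & SPEC =====
def Spec_pnf (s : String) (out : String) : Prop := out = pnf_alt s
instance (s : String) (out : String) : Decidable (Spec_pnf s out) := by unfold Spec_pnf; infer_instance

-- ===== CLAIM (what is proved, stated in full; the proofs are below) =====
def Claim_equal_pnf : Prop := ∀ (s : String), Dom_pnf s → Spec_pnf s (pnf s)

-- ===== LEMMAS AND PROOFS =====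

-- the first-occurrence list accumulated from a (A's dict-key order; = PySem.Set fold)
def ff (a l : List Char) : List Char := l.foldl PySem.Set.add a

-- the (char, rank) pairs corresponding to A's dict, with ranks starting at k+1
def pairsOf (k : Int) (a : List Char) : List (Char × Int) :=
  (PySem.List.enumerate a k).map (fun p => (p.2, p.1 + 1))

theorem pairsOf_cons (k : Int) (x : Char) (xs : List Char) :
    pairsOf k (x :: xs) = (x, k + 1) :: pairsOf (k + 1) xs := by
  simp [pairsOf, PySem.List.enumerate_cons]

theorem pairsOf_append_singleton (k : Int) (a : List Char) (c : Char) :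
    pairsOf k (a ++ [c]) = pairsOf k a ++ [(c, k + a.length + 1)] := by
  simp [pairsOf, PySem.List.enumerate_append, PySem.List.enumerate_cons]

theorem keys_mk_pairsOf (k : Int) (a : List Char) :
    (PySem.Dict.mk (pairsOf k a)).keys = a := by
  simp [pairsOf, PySem.Dict.keys_mk, List.map_map, Function.comp_def,
    PySem.List.map_snd_enumerate]

theorem contains_mk_pairsOf (k : Int) (a : List Char) (c : Char) :
    (PySem.Dict.mk (pairsOf k a)).contains c = decide (c ∈ a) := by
  have hk := keys_mk_pairsOf k a
  by_cases h : c ∈ a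
  · have hc : (PySem.Dict.mk (pairsOf k a)).contains c = true :=
      (PySem.Dict.contains_iff_mem_keys _ _).2 (hk.symm ▸ h)
    simp [hc, h]
  · cases hcb : (PySem.Dict.mk (pairsOf k a)).contains c
    · simp [h]
    · exact absurd (hk ▸ (PySem.Dict.contains_iff_mem_keys _ _).1 hcb) h

theorem get?_mk_pairsOf (a : List Char) (k : Int) (c : Char) (h : c ∈ a) :
    (PySem.Dict.mk (pairsOf k a)).get? c = some (k + (List.idxOf c a : Int) + 1) := by
  induction a generalizing k with
  | nil => cases h
  | cons x xs ih =>
    rw [pairsOf_cons, PySem.Dict.get?_mk_cons]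
    by_cases hx : x = c
    · subst hx; simp [List.idxOf_cons_self]
    · have hc : c ∈ xs := by
        rcases List.mem_cons.mp h with h1 | h1
        · exact absurd h1.symm hx
        · exact h1
      rw [if_neg (by simp [hx]), ih (k + 1) hc, List.idxOf_cons_ne _ (by simp [hx])]
      congr 1
      push_cast
      ring

theorem add_eq (a : List Char) (c : Char) :
    PySem.Set.add a c = a ++ (if c ∈ a then [] else [c]) := by
  by_cases h : c ∈ a <;> simp [PySem.Set.add, h]

theorem ff_prefix : ∀ (l a : List Char), ∃ t, ff a l = a ++ t := by
  intro l
  induction l with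
  | nil => intro a; exact ⟨[], by simp [ff]⟩
  | cons c l ih =>
    intro a
    rcases ih (PySem.Set.add a c) with ⟨t, ht⟩
    refine ⟨(if c ∈ a then [] else [c]) ++ t, ?_⟩
    simp only [ff, List.foldl_cons] at ht ⊢
    rw [ht, add_eq, List.append_assoc]

theorem idxOf_ff (l a : List Char) (c : Char) (h : c ∈ a) :
    List.idxOf c (ff a l) = List.idxOf c a := by
  rcases ff_prefix l a with ⟨t, ht⟩
  rw [ht, List.idxOf_append, if_pos h]

-- A's loop, characterised: ranks are 1-based positions in the first-occurrence list
theorem loopA : ∀ (l a : List Char) (out : List String), a.Nodup →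
    l.foldl pnfStep (out, PySem.Dict.mk (pairsOf 0 a), (a.length : Int) + 1)
      = (out ++ l.map (fun c => PySem.Int.toStr ((List.idxOf c (ff a l) : Int) + 1)),
         PySem.Dict.mk (pairsOf 0 (ff a l)), ((ff a l).length : Int) + 1) := by
  intro l
  induction l with
  | nil => intro a out _; simp [ff]
  | cons c l ih =>
    intro a out hnd
    by_cases hc : c ∈ a
    · -- character already seen: else-branch of A's loop body
      have hcon : (PySem.Dict.mk (pairsOf 0 a)).contains c = true := by
        rw [contains_mk_pairsOf]; simpa using hc
      have hget : (PySem.Dict.mk (pairsOf 0 a)).getD c 0 = (List.idxOf c a : Int) + 1 := by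
        rw [PySem.Dict.getD_eq_get?_getD, get?_mk_pairsOf a 0 c hc]; simp
      have hff : ff a (c :: l) = ff a l := by
        simp only [ff, List.foldl_cons, add_eq a c, hc, if_pos, List.append_nil]
      rw [List.foldl_cons,
        show pnfStep (out, PySem.Dict.mk (pairsOf 0 a), ((a.length : Int)) + 1) c
            = (out ++ [PySem.Int.toStr ((List.idxOf c a : Int) + 1)],
               PySem.Dict.mk (pairsOf 0 a), ((a.length : Int)) + 1) by
          simp [pnfStep, hcon, hget],
        ih a _ hnd, hff]
      simp [idxOf_ff l a c hc]
    · -- fresh character: then-branch of A's loop body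
      have hcon : (PySem.Dict.mk (pairsOf 0 a)).contains c = false := by
        rw [contains_mk_pairsOf]; simpa using hc
      have hins : (PySem.Dict.mk (pairsOf 0 a)).insert c ((a.length : Int) + 1)
          = PySem.Dict.mk (pairsOf 0 (a ++ [c])) := by
        apply PySem.Dict.ext
        rw [PySem.Dict.items_insert_of_not_contains _ _ hcon]
        simp [pairsOf_append_singleton]
      have hnd' : (a ++ [c]).Nodup := by
        rw [List.nodup_append]
        refine ⟨hnd, List.nodup_singleton c, ?_⟩
        intro x hx y hy
        have hyc : y = c := by simpa using hy
        subst hyc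
        exact fun hxe => hc (hxe ▸ hx)
      have hff : ff a (c :: l) = ff (a ++ [c]) l := by
        simp [ff, PySem.Set.add, hc]
      have hidx : List.idxOf c (ff (a ++ [c]) l) = a.length := by
        rw [idxOf_ff l (a ++ [c]) c (by simp), List.idxOf_append, if_neg hc]
        simp
      rw [List.foldl_cons,
        show pnfStep (out, PySem.Dict.mk (pairsOf 0 a), ((a.length : Int)) + 1) c
            = (out ++ [PySem.Int.toStr ((a.length : Int) + 1)],
               PySem.Dict.mk (pairsOf 0 (a ++ [c])), (((a ++ [c]).length : Int)) + 1) by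
          simp [pnfStep, hcon, hins],
        ih (a ++ [c]) _ hnd', hff]
      simp [hidx]

-- B's closed form equals the position in the first-occurrence list:
-- for c ∈ l with first occurrence at index k, |set(take k l)| = idxOf c (ff [] l)
theorem closedForm (l : List Char) (c : Char) (h : c ∈ l) :
    PySem.Set.len (PySem.Set.ofList (l.take ((PySem.List.index? l c).getD 0)))
      = (List.idxOf c (ff [] l) : Int) := by
  obtain ⟨k, hk⟩ : ∃ k, List.idxOf? c l = some k :=
    Option.ne_none_iff_exists'.1 (fun hn => (List.idxOf?_eq_none_iff.1 hn) h)
  obtain ⟨hklt, hgetk, hmin⟩ := List.idxOf?_eq_some_iff.1 hk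
  have hidx : PySem.List.index? l c = some k := by
    rw [PySem.List.index?_eq_idxOf?, hk]
  have hnotm : c ∉ l.take k := by
    intro hmem
    obtain ⟨j, hjlt, hg⟩ := List.getElem_of_mem hmem
    have hjk : j < k := lt_of_lt_of_le hjlt (by simp)
    exact hmin j hjk (by rw [← hg, List.getElem_take])
  have hdec : l = l.take k ++ c :: l.drop (k + 1) := by
    conv_lhs => rw [← List.take_append_drop k l]
    rw [List.drop_eq_getElem_cons hklt, hgetk]
  have hset : ff [] (l.take k) = PySem.Set.ofList (l.take k) := by
    rw [PySem.Set.ofList_eq_foldl]; rfl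
  have hnotm' : c ∉ PySem.Set.ofList (l.take k) := fun hm =>
    hnotm ((PySem.Set.mem_ofList _ _).1 hm)
  have hffl : ∃ t, ff [] l = (PySem.Set.ofList (l.take k) ++ [c]) ++ t := by
    have : ff [] l = ff (PySem.Set.ofList (l.take k) ++ [c]) (l.drop (k + 1)) := by
      conv_lhs => rw [hdec]
      simp only [ff, List.foldl_append, List.foldl_cons]
      rw [show (List.foldl PySem.Set.add [] (l.take k)) = ff [] (l.take k) from rfl, hset,
        add_eq, if_neg hnotm']
    rcases ff_prefix (l.drop (k + 1)) (PySem.Set.ofList (l.take k) ++ [c]) with ⟨t, ht⟩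
    exact ⟨t, by rw [this, ht]⟩
  rcases hffl with ⟨t, ht⟩
  rw [hidx, Option.getD_some, ht, List.append_assoc, List.idxOf_append, if_neg hnotm']
  simp [PySem.Set.len]

-- ===== VERDICT (by name: the statement is the Claim_ definition above) =====
theorem pnf_spec : Claim_equal_pnf := by
  intro s _
  unfold Spec_pnf pnf pnf_alt
  have hA := loopA s.toList [] [] List.nodup_nil
  simp only [List.length_nil, Nat.cast_zero, zero_add, List.nil_append] at hA
  rw [show (PySem.Dict.empty : PySem.Dict Char Int) = PySem.Dict.mk (pairsOf 0 []) from rfl, hA]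
  dsimp only
  congr 1
  apply List.map_congr_left
  intro c hc
  rw [closedForm s.toList c hc]
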